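-- pv_equiv track=rewrite | github.com/muneebaifrah/Unstop-100-Days-Coding-Sprint | Day-47/2.Lucky_Strings.py | lucky_strings
-- ===== SOURCE A (Python) =====
-- MOD = 10**9 + 7
--
-- def lucky_strings(n):
--     if n == 1 or n == 2:
--         return 2  # Base cases
--
--     a, b = 2, 2  # F(1) = 2, F(2) = 2
--
--     for _ in range(3, n + 1):
--         c = (a + b) % MOD
--         a, b = b, c
--
--     return b
-- ===== SOURCE B (Python) =====
-- MOD = 10**9 + 7
--
-- def _fib_pair(k):
--     """(F(k) % MOD, F(k+1) % MOD) with F(1)=F(2)=1, by fast doubling."""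
--     if k == 0:
--         return (0, 1)
--     a, b = _fib_pair(k // 2)
--     c = a * (2 * b - a) % MOD
--     d = (a * a + b * b) % MOD
--     if k % 2 == 1:
--         return (d, (c + d) % MOD)
--     return (c, d)
--
-- def lucky_strings(n):
--     if n <= 2:
--         return 2
--     return 2 * _fib_pair(n)[0] % MOD
-- ===== Notes on version B (the rewrite author's own statement) =====
-- stated objective: faster
-- what changed: Replaces the O(n) linear iteration of the Fibonacci-like recurrence with O(log n) fast-doubling recursion on the Fibonacci pair (F(k), F(k+1)) mod 1e9+7.
import Mathlib
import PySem

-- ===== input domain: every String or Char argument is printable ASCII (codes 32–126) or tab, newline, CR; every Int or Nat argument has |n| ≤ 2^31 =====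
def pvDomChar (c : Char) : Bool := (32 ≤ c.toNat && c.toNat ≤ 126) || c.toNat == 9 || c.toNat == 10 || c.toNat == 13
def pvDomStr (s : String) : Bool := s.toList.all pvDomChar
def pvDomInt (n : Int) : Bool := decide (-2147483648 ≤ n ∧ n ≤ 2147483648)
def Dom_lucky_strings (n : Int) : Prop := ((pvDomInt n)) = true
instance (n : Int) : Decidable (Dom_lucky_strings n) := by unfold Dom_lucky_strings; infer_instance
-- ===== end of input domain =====

-- B replaces A's O(n) linear iteration with O(log n) fast doubling on the Fibonacci pair mod 1e9+7 (objective: faster, asymptotic).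

def luckyMOD : Int := 1000000007

-- ===== PORT A =====
def lucky_strings (n : Int) : Int :=
  if n = 1 ∨ n = 2 then 2
  else
    ((PySem.List.pyRange 3 (n + 1) 1).foldl
      (fun (ab : Int × Int) _ => (ab.2, PySem.Int.mod (ab.1 + ab.2) luckyMOD)) (2, 2)).2

-- ===== PORT B =====
-- _fib_pair(k): (F(k) % MOD, F(k+1) % MOD) by fast doubling
def fibPair (k : Nat) : Int × Int :=
  if h : k = 0 then (0, 1)
  else
    let p := fibPair (k / 2)
    let a := p.1
    let b := p.2
    let c := PySem.Int.mod (a * (2 * b - a)) luckyMOD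
    let d := PySem.Int.mod (a * a + b * b) luckyMOD
    if k % 2 = 1 then (d, PySem.Int.mod (c + d) luckyMOD) else (c, d)
termination_by k
decreasing_by exact Nat.div_lt_self (Nat.pos_of_ne_zero h) (by omega)

def lucky_strings_alt (n : Int) : Int :=
  if n ≤ 2 then 2
  else PySem.Int.mod (2 * (fibPair n.toNat).1) luckyMOD

-- ===== PRECONDITION & SPEC =====
def Spec_lucky_strings (n : Int) (out : Int) : Prop := out = lucky_strings_alt n
instance (n : Int) (out : Int) : Decidable (Spec_lucky_strings n out) := by unfold Spec_lucky_strings; infer_instance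

-- ===== CLAIM (what is proved, stated in full; the proofs are below) =====
def Claim_equal_lucky_strings : Prop := ∀ (n : Int), Dom_lucky_strings n → Spec_lucky_strings n (lucky_strings n)

-- ===== LEMMAS AND PROOFS =====

theorem luckyMOD_pos : (0:Int) < luckyMOD := by norm_num [luckyMOD]

-- A's loop body with Python mod rewritten to Int.emod (valid since luckyMOD > 0)
def stepE (ab : Int × Int) : Int × Int := (ab.2, (ab.1 + ab.2) % luckyMOD)

theorem foldl_ignore (l : List Int) (init : Int × Int) :
    l.foldl (fun (ab : Int × Int) _ => (ab.2, PySem.Int.mod (ab.1 + ab.2) luckyMOD)) init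
      = stepE^[l.length] init := by
  induction l generalizing init with
  | nil => rfl
  | cons x xs ih =>
      simp only [List.foldl_cons, List.length_cons, Function.iterate_succ_apply, ih]
      congr 1
      simp [stepE, PySem.Int.mod_eq_emod_of_pos luckyMOD_pos]

theorem iterE_fib (j : Nat) :
    stepE^[j] (2, 2)
      = ((2 * (Nat.fib (j + 1) : Int)) % luckyMOD, (2 * (Nat.fib (j + 2) : Int)) % luckyMOD) := by
  induction j with
  | zero =>
      norm_num [stepE, Nat.fib, luckyMOD]
  | succ j ih =>
      rw [Function.iterate_succ_apply', ih]
      simp only [stepE]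
      refine Prod.ext rfl ?_
      have hf : (2:Int) * (Nat.fib (j+1+2) : Int)
          = 2 * (Nat.fib (j+1) : Int) + 2 * (Nat.fib (j+2) : Int) := by
        rw [show j+1+2 = (j+1)+2 from rfl, Nat.fib_add_two]; push_cast; ring
      show (_ + _) % luckyMOD = _
      rw [hf]
      have m1 : Int.ModEq luckyMOD ((2 * (Nat.fib (j+1) : Int)) % luckyMOD)
          (2 * (Nat.fib (j+1) : Int)) := Int.emod_emod_of_dvd _ dvd_rfl
      have m2 : Int.ModEq luckyMOD ((2 * (Nat.fib (j+2) : Int)) % luckyMOD)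
          (2 * (Nat.fib (j+2) : Int)) := Int.emod_emod_of_dvd _ dvd_rfl
      exact m1.add m2

theorem fibPair_correct (k : Nat) :
    fibPair k = ((Nat.fib k : Int) % luckyMOD, (Nat.fib (k + 1) : Int) % luckyMOD) := by
  induction k using Nat.strong_induction_on with
  | _ k ih =>
    rw [fibPair]
    by_cases hk : k = 0
    · subst hk; norm_num [Nat.fib, luckyMOD]
    · simp only [hk, dite_false, ih (k / 2) (Nat.div_lt_self (Nat.pos_of_ne_zero hk) (by omega))]
      set m := k / 2 with hm
      simp only [PySem.Int.mod_eq_emod_of_pos luckyMOD_pos]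
      -- modular equivalences
      have ha : Int.ModEq luckyMOD ((Nat.fib m : Int) % luckyMOD) (Nat.fib m : Int) :=
        Int.emod_emod_of_dvd _ dvd_rfl
      have hb : Int.ModEq luckyMOD ((Nat.fib (m+1) : Int) % luckyMOD) (Nat.fib (m+1) : Int) :=
        Int.emod_emod_of_dvd _ dvd_rfl
      -- doubling identities over Int
      have hle : Nat.fib m ≤ 2 * Nat.fib (m + 1) :=
        le_trans (Nat.fib_le_fib_succ) (by omega)
      have hfib1 : (Nat.fib (2 * m) : Int)
          = (Nat.fib m : Int) * (2 * (Nat.fib (m+1) : Int) - (Nat.fib m : Int)) := by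
        have h := Nat.fib_two_mul m
        zify [hle] at h
        linarith [h]
      have hfib2 : (Nat.fib (2 * m + 1) : Int)
          = (Nat.fib m : Int) * (Nat.fib m : Int) + (Nat.fib (m+1) : Int) * (Nat.fib (m+1) : Int) := by
        have h := Nat.fib_two_mul_add_one m
        zify at h
        rw [h]; ring
      have hc : ((Nat.fib m : Int) % luckyMOD
            * (2 * ((Nat.fib (m+1) : Int) % luckyMOD) - (Nat.fib m : Int) % luckyMOD)) % luckyMOD
          = (Nat.fib (2 * m) : Int) % luckyMOD := by
        have := ha.mul (((Int.ModEq.refl 2).mul hb).sub ha)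
        rw [hfib1]; exact this
      have hd : ((Nat.fib m : Int) % luckyMOD * ((Nat.fib m : Int) % luckyMOD)
            + (Nat.fib (m+1) : Int) % luckyMOD * ((Nat.fib (m+1) : Int) % luckyMOD)) % luckyMOD
          = (Nat.fib (2 * m + 1) : Int) % luckyMOD := by
        have := (ha.mul ha).add (hb.mul hb)
        rw [hfib2]; exact this
      by_cases hodd : k % 2 = 1
      · have hk2 : k = 2 * m + 1 := by omega
        simp only [hodd, if_true]
        refine Prod.ext ?_ ?_
        · simpa [hk2] using hd
        · have hsum : (Nat.fib (2 * m + 2) : Int) = (Nat.fib (2*m) : Int) + (Nat.fib (2*m+1) : Int) := by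
            rw [Nat.fib_add_two]; push_cast; ring
          show (_ + _) % luckyMOD = _
          rw [Int.add_emod, hc, hd, Int.emod_emod_of_dvd _ dvd_rfl, Int.emod_emod_of_dvd _ dvd_rfl,
              ← Int.add_emod, ← hsum]
          simp [hk2]
      · have hk2 : k = 2 * m := by omega
        simp only [hodd, if_false]
        refine Prod.ext ?_ ?_
        · simpa [hk2] using hc
        · simpa [hk2] using hd

-- ===== VERDICT (by name: the statement is the Claim_ definition above) =====
theorem lucky_strings_spec : Claim_equal_lucky_strings := by
  intro n _
  unfold Spec_lucky_strings lucky_strings lucky_strings_alt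
  by_cases h : n ≤ 2
  · have hnil : PySem.List.pyRange 3 (n + 1) 1 = [] :=
      PySem.List.pyRange_one_eq_nil (by omega)
    by_cases h0 : n ≤ 0
    · simp [show ¬(n = 1 ∨ n = 2) by omega, hnil, if_pos h]
    · have h1 : 0 < n := by omega
      interval_cases n <;> simp
  · have hlt : 2 < n := by omega
    have hcond : ¬(n = 1 ∨ n = 2) := by omega
    rw [if_neg hcond, if_neg (by omega), foldl_ignore, PySem.List.length_pyRange_one]
    rw [iterE_fib, fibPair_correct]
    have hidx : (n + 1 - 3).toNat + 2 = n.toNat := by omega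
    simp only []
    rw [hidx, PySem.Int.mod_eq_emod_of_pos luckyMOD_pos, Int.mul_emod 2 ((Nat.fib n.toNat : Int) % luckyMOD),
        Int.emod_emod_of_dvd _ dvd_rfl, ← Int.mul_emod]
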